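-- pv_equiv track=rewrite | github.com/levelup-fpga/dev_levelup_shared | fpga_rtl/constant_multiplier_package/explore_mult.py | distribute_levels
-- ===== SOURCE A (Python) =====
-- from typing import List, Tuple
--
-- def distribute_levels(total_levels: int, stages: int) -> List[int]:
--     if stages <= 0:
--         raise ValueError("stages must be >= 1")
--     if total_levels <= 0:
--         return [0] * stages
--     base = total_levels // stages
--     rem = total_levels % stages
--     return [base + (1 if i < rem else 0) for i in range(stages)]
-- ===== SOURCE B (Python) =====
-- from typing import List, Tuple
--
-- def distribute_levels(total_levels: int, stages: int) -> List[int]: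
--     if stages <= 0:
--         raise ValueError("stages must be >= 1")
--     if total_levels <= 0:
--         return [0] * stages
--     out = []
--     remaining = total_levels
--     stages_left = stages
--     while stages_left > 0:
--         v = -(-remaining // stages_left)
--         out.append(v)
--         remaining -= v
--         stages_left -= 1
--     return out
-- ===== Notes on version B (the rewrite author's own statement) =====
-- stated objective: alternative
-- what changed: Replaces the precomputed base/remainder and the indexed comprehension with a greedy single-pass loop that repeatedly takes the ceiling of remaining/stages_left and subtracts it.
import Mathlib
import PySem

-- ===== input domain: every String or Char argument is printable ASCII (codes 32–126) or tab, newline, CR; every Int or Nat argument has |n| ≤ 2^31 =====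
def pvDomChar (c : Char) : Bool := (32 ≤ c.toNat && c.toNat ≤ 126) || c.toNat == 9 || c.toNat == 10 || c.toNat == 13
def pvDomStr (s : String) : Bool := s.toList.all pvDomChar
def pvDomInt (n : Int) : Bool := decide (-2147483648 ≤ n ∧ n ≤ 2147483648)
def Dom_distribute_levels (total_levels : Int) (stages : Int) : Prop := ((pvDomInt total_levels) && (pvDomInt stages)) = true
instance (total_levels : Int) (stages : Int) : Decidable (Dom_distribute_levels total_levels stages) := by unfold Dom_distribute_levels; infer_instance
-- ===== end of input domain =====

-- B replaces the precomputed base/remainder comprehension with a greedy one-pass loop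
-- taking the ceiling of remaining/stages_left at each step (objective: alternative).

-- ===== PORT A =====
def distribute_levels (total_levels : Int) (stages : Int) : List Int :=
  if stages ≤ 0 then []   -- Python raises ValueError here; excluded by Pre_
  else if total_levels ≤ 0 then List.replicate stages.toNat 0
  else
    let base := PySem.Int.floordiv total_levels stages
    let rem := PySem.Int.mod total_levels stages
    (PySem.List.pyRange 0 stages 1).map (fun i => base + if i < rem then 1 else 0)

-- ===== PORT B =====
-- the while loop of Source B, recursing on stages_left (a Nat fuel = stages_left)
def pvAltLoop : Nat → Int → List Int
  | 0, _ => []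
  | n+1, remaining =>
    let v := -(PySem.Int.floordiv (-remaining) ((n : Int) + 1))
    v :: pvAltLoop n (remaining - v)

def distribute_levels_alt (total_levels : Int) (stages : Int) : List Int :=
  if stages ≤ 0 then []   -- Python raises ValueError here; excluded by Pre_
  else if total_levels ≤ 0 then List.replicate stages.toNat 0
  else pvAltLoop stages.toNat total_levels

-- ===== PRECONDITION & SPEC =====
-- Pre_ excludes exactly stages <= 0, where Python A raises ValueError.
def Pre_distribute_levels (total_levels : Int) (stages : Int) : Prop := 0 < stages
instance (total_levels : Int) (stages : Int) : Decidable (Pre_distribute_levels total_levels stages) := by unfold Pre_distribute_levels; infer_instance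
def pvWitness_distribute_levels : Int × Int := (7, 3)

def Spec_distribute_levels (total_levels : Int) (stages : Int) (out : List Int) : Prop := out = distribute_levels_alt total_levels stages
instance (total_levels : Int) (stages : Int) (out : List Int) : Decidable (Spec_distribute_levels total_levels stages out) := by unfold Spec_distribute_levels; infer_instance

-- ===== CLAIM (what is proved, stated in full; the proofs are below) =====
def Claim_equal_distribute_levels : Prop := ∀ (total_levels : Int) (stages : Int), Dom_distribute_levels total_levels stages → Pre_distribute_levels total_levels stages → Spec_distribute_levels total_levels stages (distribute_levels total_levels stages)

-- ===== LEMMAS AND PROOFS =====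

-- the greedy ceiling loop computes the front-loaded even split, for ANY integer t
theorem pvAltLoop_eq (n : Nat) : ∀ (t : Int),
    pvAltLoop n t = (List.range n).map
      (fun (i : Nat) => PySem.Int.floordiv t (n : Int) + if (i : Int) < PySem.Int.mod t (n : Int) then 1 else 0) := by
  induction n with
  | zero => intro t; rfl
  | succ n ih =>
    intro t
    have hpos : (0 : Int) < (n : Int) + 1 := by positivity
    set q := PySem.Int.floordiv t ((n : Int) + 1) with hq
    set r := PySem.Int.mod t ((n : Int) + 1) with hr
    have hsum : q * ((n : Int) + 1) + r = t := PySem.Int.floordiv_mul_add_mod t ((n : Int) + 1)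
    have hr0 : 0 ≤ r := PySem.Int.mod_nonneg t hpos
    have hrlt : r < (n : Int) + 1 := PySem.Int.mod_lt t hpos
    have hv : -(PySem.Int.floordiv (-t) ((n : Int) + 1)) = q + (if (0 : Int) < r then 1 else 0) := by
      rw [PySem.Int.neg_floordiv_neg_eq_iff_of_pos hpos]
      constructor <;> split_ifs with h <;> nlinarith
    simp only [pvAltLoop, hv]
    rw [List.range_succ_eq_map, List.map_cons, List.map_map]
    have hcast : ((n + 1 : Nat) : Int) = (n : Int) + 1 := by push_cast; ring
    congr 1
    rcases Nat.eq_zero_or_pos n with hn | hn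
    · subst hn; rfl
    · rw [ih]
      have hnpos : (0 : Int) < (n : Int) := by exact_mod_cast hn
      set r' : Int := r - (if (0 : Int) < r then 1 else 0) with hr'
      have hrem : t - (q + (if (0 : Int) < r then 1 else 0)) = q * (n : Int) + r' := by
        rw [hr']; split_ifs <;> linarith
      have hr'0 : 0 ≤ r' := by rw [hr']; split_ifs <;> omega
      have hr'lt : r' < (n : Int) := by rw [hr']; split_ifs <;> omega
      have hfd : PySem.Int.floordiv (t - (q + (if (0 : Int) < r then 1 else 0))) (n : Int) = q := by
        rw [PySem.Int.floordiv_eq_iff_of_pos hnpos, hrem]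
        constructor <;> nlinarith
      have hmd : PySem.Int.mod (t - (q + (if (0 : Int) < r then 1 else 0))) (n : Int) = r' := by
        have := PySem.Int.floordiv_mul_add_mod (t - (q + (if (0 : Int) < r then 1 else 0))) (n : Int)
        rw [hfd] at this
        omega
      rw [hfd, hmd]
      apply List.map_congr_left
      intro i _
      simp only [Function.comp_apply, hcast, ← hq, ← hr]
      congr 1
      rw [hr']
      push_cast
      by_cases h0 : (0 : Int) < r
      · simp only [h0, if_pos]; split_ifs <;> omega
      · simp only [h0, if_neg, not_false_iff]; split_ifs <;> omega

theorem pyRange_cast (n : Nat) : PySem.List.pyRange 0 (n : Int) 1 = (List.range n).map (fun (i : Nat) => (i : Int)) := by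
  induction n with
  | zero => simp [PySem.List.pyRange]
  | succ n ih =>
    rw [show ((n+1 : Nat) : Int) = (n : Int) + 1 by push_cast; ring]
    rw [PySem.List.pyRange_one_succ_right (by positivity), ih, List.range_succ]
    simp

-- ===== VERDICT (by name: the statement is the Claim_ definition above) =====
theorem distribute_levels_spec : Claim_equal_distribute_levels := by
  intro t s _ hpre
  unfold Spec_distribute_levels distribute_levels distribute_levels_alt
  have hs : ¬ s ≤ 0 := by exact not_le.mpr hpre
  rw [if_neg hs, if_neg hs]
  by_cases ht : t ≤ 0
  · rw [if_pos ht, if_pos ht]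
  · rw [if_neg ht, if_neg ht]
    obtain ⟨n, rfl⟩ : ∃ n : Nat, (n : Int) = s := ⟨s.toNat, Int.toNat_of_nonneg (le_of_lt hpre)⟩
    rw [Int.toNat_natCast, pyRange_cast, pvAltLoop_eq n t, List.map_map]
    rfl
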